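-- pv_equiv track=rewrite | github.com/mikewu-brt/closedcv | euclid/compress.py | compr_rtl
-- ===== SOURCE A (Python) =====
-- expw = 4;
--
-- sigw = 6; #4 to 6
--
-- def tbit (v, pos):
-- 	return (v&(1<<pos));
--
-- def compr_rtl (v):
-- 	e = 0;
-- 	s = 0;
-- 	for i in range (2**expw-1):
-- 		if (tbit(v, i+sigw)):
-- 			e = i+1;
-- 			s = i;
--
-- 	r = (e<<sigw)|((v>>s)&(2**sigw-1));
-- 	return r;
-- ===== SOURCE B (Python) =====
-- expw = 4
--
-- sigw = 6  # 4 to 6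
--
-- def compr_rtl(v):
--     w = (v >> sigw) & ((1 << (2**expw - 1)) - 1)
--     if w == 0:
--         e = s = 0
--     else:
--         s = w.bit_length() - 1
--         e = s + 1
--     return (e << sigw) | ((v >> s) & (2**sigw - 1))
-- ===== Notes on version B (the rewrite author's own statement) =====
-- stated objective: simpler
-- what changed: B replaces A's fixed bit-scan loop over the exponent window (which records the last set bit it sees) with a loop-free closed form: it masks out the window once and reads its highest set bit via bit_length, then assembles the same exponent/mantissa word.
import Mathlib
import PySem

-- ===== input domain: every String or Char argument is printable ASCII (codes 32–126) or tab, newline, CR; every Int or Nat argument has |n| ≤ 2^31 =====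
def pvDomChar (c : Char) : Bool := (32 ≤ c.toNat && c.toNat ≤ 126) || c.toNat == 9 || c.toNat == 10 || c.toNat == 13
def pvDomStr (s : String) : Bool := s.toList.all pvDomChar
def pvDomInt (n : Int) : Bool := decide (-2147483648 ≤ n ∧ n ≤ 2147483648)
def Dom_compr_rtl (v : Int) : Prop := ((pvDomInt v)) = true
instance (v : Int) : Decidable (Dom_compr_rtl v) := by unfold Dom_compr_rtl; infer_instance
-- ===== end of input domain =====

-- B replaces A's fixed 15-step bit-scan loop with a direct highest-set-bit (bit_length) computation on the 15-bit window: simpler and loop-free.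


-- ===== PORT A =====
-- expw = 4; sigw = 6
def tbit (v : Int) (pos : Nat) : Int := PySem.Int.band v ((1 : Int) <<< pos)

def compr_rtl (v : Int) : Int :=
  -- for i in range(2**expw - 1): if tbit(v, i+sigw): e = i+1; s = i
  let st := (List.range (2 ^ 4 - 1)).foldl
    (fun (p : Int × Nat) i => if tbit v (i + 6) ≠ 0 then ((i : Int) + 1, i) else p)
    ((0 : Int), (0 : Nat))
  PySem.Int.bor (st.1 <<< (6 : Nat)) (PySem.Int.band (v >>> st.2) (2 ^ 6 - 1))

-- ===== PORT B =====
def compr_rtl_alt (v : Int) : Int :=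
  let w := PySem.Int.band (v >>> (6 : Nat)) (((1 : Int) <<< (2 ^ 4 - 1 : Nat)) - 1)
  let s : Nat := if w = 0 then 0 else PySem.Int.bitLength w - 1
  let e : Int := if w = 0 then 0 else (s : Int) + 1
  PySem.Int.bor (e <<< (6 : Nat)) (PySem.Int.band (v >>> s) (2 ^ 6 - 1))

-- ===== PRECONDITION & SPEC =====
def Spec_compr_rtl (v : Int) (out : Int) : Prop := out = compr_rtl_alt v
instance (v : Int) (out : Int) : Decidable (Spec_compr_rtl v out) := by unfold Spec_compr_rtl; infer_instance

-- ===== CLAIM (what is proved, stated in full; the proofs are below) =====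
def Claim_equal_compr_rtl : Prop := ∀ (v : Int), Dom_compr_rtl v → Spec_compr_rtl v (compr_rtl v)

-- ===== LEMMAS AND PROOFS =====

-- masking with 2^k - 1 is taking the Euclidean remainder mod 2^k (Python-exact, all signs)
theorem band_mask (a : Int) (k : Nat) : PySem.Int.band a ((2 : Int) ^ k - 1) = a % 2 ^ k := by
  have hn1 : 1 ≤ (2 : Nat) ^ k := Nat.one_le_two_pow
  have hc : ((2 : Int) ^ k) = (((2 : Nat) ^ k : Nat) : Int) := by push_cast; ring
  have hb : (0 : Int) ≤ (2 : Int) ^ k - 1 := by rw [hc]; omega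
  have htn : ((2 : Int) ^ k - 1).toNat = 2 ^ k - 1 := by rw [hc]; omega
  by_cases ha : 0 ≤ a
  · simp only [PySem.Int.band, if_pos ha, if_pos hb, htn]
    rw [Nat.and_two_pow_sub_one_eq_mod]
    conv_rhs => rw [← Int.toNat_of_nonneg ha, hc]
    push_cast
    rfl
  · simp only [PySem.Int.band, if_pos hb, if_neg ha, htn]
    set m := (-a - 1).toNat with hm
    rw [Nat.and_comm, Nat.and_two_pow_sub_one_eq_mod]
    have hmlt : m % 2 ^ k < 2 ^ k := Nat.mod_lt _ (by omega)
    have ham : a = -(m : Int) - 1 := by omega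
    have hnm : (((2 : Nat) ^ k : Nat) : Int) * ((m / 2 ^ k : Nat) : Int) + ((m % 2 ^ k : Nat) : Int)
        = (m : Int) := by exact_mod_cast Nat.div_add_mod m (2 ^ k)
    have hr : ((2 ^ k - 1 - m % 2 ^ k : Nat) : Int) = (2 : Int) ^ k - 1 - ((m % 2 ^ k : Nat) : Int) := by
      rw [hc]; omega
    have hdecomp : a = ((2 ^ k - 1 - m % 2 ^ k : Nat) : Int)
        + (2 : Int) ^ k * (-((m / 2 ^ k : Nat) : Int) - 1) := by
      rw [hr, hc]
      linear_combination ham + hnm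
    rw [hdecomp, Int.add_mul_emod_self_left,
      Int.emod_eq_of_lt (Int.natCast_nonneg _) (by rw [hr, hc]; omega)]

-- a single-bit mask tests the bit: band a 2^p ≠ 0 ↔ a / 2^p % 2 = 1 (all signs)
theorem band_two_pow_ne_zero (a : Int) (p : Nat) :
    PySem.Int.band a ((2 : Int) ^ p) ≠ 0 ↔ a / 2 ^ p % 2 = 1 := by
  have hn1 : 1 ≤ (2 : Nat) ^ p := Nat.one_le_two_pow
  have hc : ((2 : Int) ^ p) = (((2 : Nat) ^ p : Nat) : Int) := by push_cast; ring
  have hb : (0 : Int) ≤ (2 : Int) ^ p := by positivity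
  have htn : ((2 : Int) ^ p).toNat = 2 ^ p := by rw [hc]; omega
  by_cases ha : 0 ≤ a
  · simp only [PySem.Int.band, if_pos ha, if_pos hb, htn]
    rw [Nat.and_two_pow, Nat.testBit_eq_decide_div_mod_eq]
    have hdiv : a / (2 : Int) ^ p = ((a.toNat / 2 ^ p : Nat) : Int) := by
      conv_lhs => rw [← Int.toNat_of_nonneg ha, hc]
      push_cast
      rfl
    rw [hdiv]
    by_cases ht : a.toNat / 2 ^ p % 2 = 1
    · simp only [ht, decide_true, Bool.toNat_true, one_mul]
      omega
    · simp only [ht, decide_false, Bool.toNat_false, zero_mul]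
      omega
  · simp only [PySem.Int.band, if_pos hb, if_neg ha, htn]
    set m := (-a - 1).toNat with hm
    rw [Nat.and_comm, Nat.and_two_pow, Nat.testBit_eq_decide_div_mod_eq]
    have hmlt : m % 2 ^ p < 2 ^ p := Nat.mod_lt _ (by omega)
    have ham : a = -(m : Int) - 1 := by omega
    have hnm : (((2 : Nat) ^ p : Nat) : Int) * ((m / 2 ^ p : Nat) : Int) + ((m % 2 ^ p : Nat) : Int)
        = (m : Int) := by exact_mod_cast Nat.div_add_mod m (2 ^ p)
    have hr : ((2 ^ p - 1 - m % 2 ^ p : Nat) : Int) = (2 : Int) ^ p - 1 - ((m % 2 ^ p : Nat) : Int) := by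
      rw [hc]; omega
    have hdiv : a / (2 : Int) ^ p = -((m / 2 ^ p : Nat) : Int) - 1 := by
      have hdecomp : a = ((2 ^ p - 1 - m % 2 ^ p : Nat) : Int)
          + (-((m / 2 ^ p : Nat) : Int) - 1) * (2 : Int) ^ p := by
        rw [hr, hc]
        linear_combination ham + hnm
      rw [hdecomp, Int.add_mul_ediv_right _ _ (show ((2 : Int) ^ p) ≠ 0 by positivity),
        Int.ediv_eq_zero_of_lt (Int.natCast_nonneg _) (by rw [hr, hc]; omega)]
      ring
    rw [hdiv]
    by_cases ht : m / 2 ^ p % 2 = 1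
    · simp only [ht, decide_true, Bool.toNat_true, one_mul]
      omega
    · simp only [ht, decide_false, Bool.toNat_false, zero_mul]
      omega

-- bit i of the 15-bit window equals bit i of the unmasked value, for i ≤ 14
theorem window_bit (x : Int) (i : Nat) (h : i ≤ 14) :
    (x % 2 ^ 15) / 2 ^ i % 2 = x / 2 ^ i % 2 := by
  have h15 : (2 : Int) ^ 15 = 2 * 2 ^ (14 - i) * 2 ^ i := by
    rw [mul_assoc, ← pow_add, ← pow_succ']
    congr 1
    omega
  have hq : x % (2 : Int) ^ 15 = x + (-(2 * (2 ^ (14 - i) * (x / 2 ^ 15)))) * 2 ^ i := by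
    rw [Int.emod_def]
    linear_combination (-(x / (2 : Int) ^ 15)) * h15
  rw [hq, Int.add_mul_ediv_right _ _ (show ((2 : Int) ^ i) ≠ 0 by positivity)]
  generalize (2 : Int) ^ (14 - i) * (x / 2 ^ 15) = t
  generalize x / (2 : Int) ^ i = y
  omega

theorem foldl_skip {α β : Type} (g : β → α → β) (l : List α) (p : β)
    (h : ∀ x ∈ l, ∀ q, g q x = q) : l.foldl g p = p := by
  induction l generalizing p with
  | nil => rfl
  | cons a t ih =>
    simp only [List.foldl_cons, h a (by simp)]
    exact ih p (fun x hx q => h x (by simp [hx]) q)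

-- fold characterization: if bit k fires and all higher bits (≤ 14) do not, the state ends at (k+1, k)
theorem fold_high (v : Int) (k : Nat) (hk : k ≤ 14)
    (hck : tbit v (k + 6) ≠ 0)
    (hhi : ∀ i, k < i → i < 15 → tbit v (i + 6) = 0) :
    (List.range (2 ^ 4 - 1)).foldl
      (fun (p : Int × Nat) i => if tbit v (i + 6) ≠ 0 then ((i : Int) + 1, i) else p)
      ((0 : Int), (0 : Nat)) = ((k : Int) + 1, k) := by
  have h15 : (2 ^ 4 - 1 : Nat) = (k + 1) + (14 - k) := by omega
  rw [h15, List.range_add, List.foldl_append, List.range_succ, List.foldl_append]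
  simp only [List.foldl_cons, List.foldl_nil, if_pos hck]
  apply foldl_skip
  intro x hx q
  simp only [List.mem_map, List.mem_range] at hx
  obtain ⟨j, hj, rfl⟩ := hx
  simp [hhi (k + 1 + j) (by omega) (by omega)]

theorem fold_zero (v : Int)
    (hall : ∀ i, i < 15 → tbit v (i + 6) = 0) :
    (List.range (2 ^ 4 - 1)).foldl
      (fun (p : Int × Nat) i => if tbit v (i + 6) ≠ 0 then ((i : Int) + 1, i) else p)
      ((0 : Int), (0 : Nat)) = ((0 : Int), (0 : Nat)) := by
  apply foldl_skip
  intro x hx q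
  simp only [List.mem_range] at hx
  simp [hall x (by omega)]

-- ===== VERDICT (by name: the statement is the Claim_ definition above) =====
theorem compr_rtl_spec : Claim_equal_compr_rtl := by
  intro v _
  unfold Spec_compr_rtl compr_rtl compr_rtl_alt
  have hcond : ∀ i : Nat, i ≤ 14 →
      (tbit v (i + 6) ≠ 0 ↔ ((v / 2 ^ 6) % 2 ^ 15) / 2 ^ i % 2 = 1) := by
    intro i hi
    have h1 : tbit v (i + 6) = PySem.Int.band v ((2 : Int) ^ (i + 6)) := by
      unfold tbit; rw [Int.shiftLeft_eq, one_mul]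
    rw [h1, band_two_pow_ne_zero, window_bit _ _ hi, Int.ediv_ediv_of_nonneg (show (0 : Int) ≤ 2 ^ 6 by norm_num),
      ← pow_add, Nat.add_comm 6 i]
  have hw : PySem.Int.band (v >>> (6 : Nat)) (((1 : Int) <<< (2 ^ 4 - 1 : Nat)) - 1)
      = (v / 2 ^ 6) % 2 ^ 15 := by
    rw [show ((1 : Int) <<< (2 ^ 4 - 1 : Nat)) - 1 = (2 : Int) ^ 15 - 1 from by
        rw [Int.shiftLeft_eq]; norm_num,
      band_mask, Int.shiftRight_eq_div_pow]
    norm_num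
  set w := (v / 2 ^ 6) % 2 ^ 15 with hwdef
  have hw0 : 0 ≤ w := Int.emod_nonneg _ (by positivity)
  have hwlt : w < 2 ^ 15 := Int.emod_lt_of_pos _ (by positivity)
  by_cases hz : w = 0
  · have hall : ∀ i, i < 15 → tbit v (i + 6) = 0 := by
      intro i hi
      by_contra hne
      have h2 := (hcond i (by omega)).mp hne
      rw [hz] at h2
      simp at h2
    simp only [hw, hz, fold_zero v hall]
    norm_num
  · set bl := PySem.Int.bitLength w with hbl
    have hbl1 : 1 ≤ bl := by
      rcases Nat.eq_zero_or_pos bl with h0 | h1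
      · exfalso
        have hlt := PySem.Int.lt_two_pow_bitLength w
        rw [← hbl, h0] at hlt
        simp at hlt
        omega
      · exact h1
    set k := bl - 1 with hkdef
    have hblk : bl = k + 1 := by omega
    have hlow : 2 ^ k ≤ w.natAbs := by
      have h := PySem.Int.two_pow_bitLength_le w hz
      rwa [← hbl, ← hkdef] at h
    have hhigh : w.natAbs < 2 ^ (k + 1) := by
      have h := PySem.Int.lt_two_pow_bitLength w
      rwa [← hbl, hblk] at h
    have hlowI : (2 : Int) ^ k ≤ w := by
      have hcast : (((2 : Nat) ^ k : Nat) : Int) ≤ (w.natAbs : Int) := by exact_mod_cast hlow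
      rw [Int.natAbs_of_nonneg hw0] at hcast
      exact_mod_cast hcast
    have hhighI : w < (2 : Int) ^ (k + 1) := by
      have hcast : (w.natAbs : Int) < (((2 : Nat) ^ (k + 1) : Nat) : Int) := by exact_mod_cast hhigh
      rw [Int.natAbs_of_nonneg hw0] at hcast
      exact_mod_cast hcast
    have hk14 : k ≤ 14 := by
      by_contra hgt
      have h2 : (2 : Nat) ^ 15 ≤ 2 ^ k := Nat.pow_le_pow_right (by norm_num) (by omega)
      have h3 : (2 : Int) ^ 15 ≤ w :=
        le_trans (show (2 : Int) ^ 15 ≤ (2 : Int) ^ k from by exact_mod_cast h2) hlowI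
      omega
    have hck : tbit v (k + 6) ≠ 0 := by
      rw [hcond k hk14]
      have h1 : 1 ≤ w / 2 ^ k := by
        rw [Int.le_ediv_iff_mul_le (by positivity)]
        omega
      have h2 : w / 2 ^ k < 2 := by
        rw [Int.ediv_lt_iff_lt_mul (by positivity)]
        have hp : (2 : Int) * 2 ^ k = 2 ^ (k + 1) := by rw [pow_succ]; ring
        omega
      rw [show w / (2 : Int) ^ k = 1 from by omega]
      norm_num
    have hhi : ∀ i, k < i → i < 15 → tbit v (i + 6) = 0 := by
      intro i hki hi15
      by_contra hne
      have h2 := (hcond i (by omega)).mp hne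
      have hle : (2 : Int) ^ (k + 1) ≤ 2 ^ i := by
        have h4 : (2 : Nat) ^ (k + 1) ≤ 2 ^ i := Nat.pow_le_pow_right (by norm_num) (by omega)
        exact_mod_cast h4
      rw [Int.ediv_eq_zero_of_lt hw0 (by omega)] at h2
      simp at h2
    simp only [hw, fold_high v k hk14 hck hhi, if_neg hz, ← hbl, hblk]
    norm_num
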